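-- pv_equiv track=rewrite | github.com/OctaInsight/ExplainFutures | core/nlp/templates.py | classify_direction
-- ===== SOURCE A (Python) =====
-- def classify_direction(verb: str) -> str:
--     """Classify verb into direction"""
--     verb_lower = verb.lower()
--
--     if any(word in verb_lower for word in ['increase', 'grow', 'rise', 'expand', 'gain']):
--         return 'increase'
--     elif any(word in verb_lower for word in ['decrease', 'fall', 'decline', 'drop', 'reduce', 'contract']):
--         return 'decrease'
--     elif any(word in verb_lower for word in ['reach', 'hit', 'attain', 'achieve']):
--         return 'target'
--     elif any(word in verb_lower for word in ['remain', 'stable', 'constant', 'unchanged']):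
--         return 'stable'
--     elif 'double' in verb_lower:
--         return 'double'
--     elif 'halve' in verb_lower or 'half' in verb_lower:
--         return 'halve'
--     elif 'triple' in verb_lower:
--         return 'triple'
--     else:
--         return 'increase'  # default
-- ===== SOURCE B (Python) =====
-- def classify_direction(verb: str) -> str:
--     """Classify verb into direction"""
--     # Single left-to-right scan: at each position of the lowered string, test which
--     # keyword starts there and keep the minimum priority seen; map it to its label.
--     priority = {'increase': 0, 'grow': 0, 'rise': 0, 'expand': 0, 'gain': 0,
--                 'decrease': 1, 'fall': 1, 'decline': 1, 'drop': 1, 'reduce': 1, 'contract': 1,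
--                 'reach': 2, 'hit': 2, 'attain': 2, 'achieve': 2,
--                 'remain': 3, 'stable': 3, 'constant': 3, 'unchanged': 3,
--                 'double': 4, 'halve': 5, 'half': 5, 'triple': 6}
--     labels = ['increase', 'decrease', 'target', 'stable', 'double', 'halve', 'triple']
--     v = verb.lower()
--     best = 7
--     for i in range(len(v)):
--         for kw, pri in priority.items():
--             if pri < best and v.startswith(kw, i):
--                 best = pri
--     return labels[best] if best < 7 else 'increase'
-- ===== Notes on version B (the rewrite author's own statement) =====
-- stated objective: alternative
-- what changed: Replaces the keyword-driven if/elif chain of substring tests by a position-driven scan: one pass over the lowered string that, at each index, checks which keyword of a priority map starts there and keeps the minimum priority, mapped to its label at the end (default 'increase').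
import Mathlib
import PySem

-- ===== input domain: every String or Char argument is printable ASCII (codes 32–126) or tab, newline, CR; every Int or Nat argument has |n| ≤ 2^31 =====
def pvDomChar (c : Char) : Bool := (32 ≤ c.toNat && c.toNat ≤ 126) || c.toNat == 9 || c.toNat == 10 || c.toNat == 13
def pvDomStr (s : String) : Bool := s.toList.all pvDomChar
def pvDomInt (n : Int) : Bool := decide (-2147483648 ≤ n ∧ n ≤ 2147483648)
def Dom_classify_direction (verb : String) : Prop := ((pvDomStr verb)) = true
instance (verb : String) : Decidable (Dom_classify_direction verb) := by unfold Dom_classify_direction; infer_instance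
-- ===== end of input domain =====

-- B replaces A's keyword-driven if/elif substring tests by a position-driven scan keeping the minimum priority (alternative, same cost).


-- ===== PORT A =====
def classify_direction (verb : String) : String :=
  let verb_lower := PySem.Str.lower verb
  if (["increase", "grow", "rise", "expand", "gain"].any
      (fun word => PySem.Str.isIn word verb_lower)) then "increase"
  else if (["decrease", "fall", "decline", "drop", "reduce", "contract"].any
      (fun word => PySem.Str.isIn word verb_lower)) then "decrease"
  else if (["reach", "hit", "attain", "achieve"].any
      (fun word => PySem.Str.isIn word verb_lower)) then "target"
  else if (["remain", "stable", "constant", "unchanged"].any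
      (fun word => PySem.Str.isIn word verb_lower)) then "stable"
  else if PySem.Str.isIn "double" verb_lower then "double"
  else if PySem.Str.isIn "halve" verb_lower || PySem.Str.isIn "half" verb_lower then "halve"
  else if PySem.Str.isIn "triple" verb_lower then "triple"
  else "increase"

-- ===== PORT B =====
-- the priority dict of Source B, in insertion order
def cdPriority : List (String × Nat) :=
  [("increase", 0), ("grow", 0), ("rise", 0), ("expand", 0), ("gain", 0),
   ("decrease", 1), ("fall", 1), ("decline", 1), ("drop", 1), ("reduce", 1), ("contract", 1),
   ("reach", 2), ("hit", 2), ("attain", 2), ("achieve", 2),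
   ("remain", 3), ("stable", 3), ("constant", 3), ("unchanged", 3),
   ("double", 4), ("halve", 5), ("half", 5), ("triple", 6)]

def cdLabels : List String :=
  ["increase", "decrease", "target", "stable", "double", "halve", "triple"]

-- v.startswith(kw, i) with 0 ≤ i is exactly: kw.toList is a prefix of v.toList.drop i
def classify_direction_alt (verb : String) : String :=
  let v := (PySem.Str.lower verb).toList
  let best := (List.range v.length).foldl
    (fun b i => cdPriority.foldl
      (fun b p => if p.2 < b ∧ p.1.toList.isPrefixOf (v.drop i) then p.2 else b) b) 7
  if best < 7 then cdLabels.getD best "increase" else "increase"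

-- ===== PRECONDITION & SPEC =====
def Spec_classify_direction (verb : String) (out : String) : Prop := out = classify_direction_alt verb
instance (verb : String) (out : String) : Decidable (Spec_classify_direction verb out) := by unfold Spec_classify_direction; infer_instance

-- ===== CLAIM (what is proved, stated in full; the proofs are below) =====
def Claim_equal_classify_direction : Prop := ∀ (verb : String), Dom_classify_direction verb → Spec_classify_direction verb (classify_direction verb)

-- ===== LEMMAS AND PROOFS =====

-- A's seven branch conditions, numbered by priority (proof helper)
def cdFlag (j : Nat) (s : String) : Bool :=
  match j with
  | 0 => ["increase", "grow", "rise", "expand", "gain"].any (fun word => PySem.Str.isIn word s)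
  | 1 => ["decrease", "fall", "decline", "drop", "reduce", "contract"].any (fun word => PySem.Str.isIn word s)
  | 2 => ["reach", "hit", "attain", "achieve"].any (fun word => PySem.Str.isIn word s)
  | 3 => ["remain", "stable", "constant", "unchanged"].any (fun word => PySem.Str.isIn word s)
  | 4 => PySem.Str.isIn "double" s
  | 5 => PySem.Str.isIn "halve" s || PySem.Str.isIn "half" s
  | 6 => PySem.Str.isIn "triple" s
  | _ => false

-- generic characterization of a min-keeping foldl
theorem minfold_char {α : Type} (step : Nat → α → Nat) (R : α → Nat → Prop)
    (h1 : ∀ b x, step b x ≤ b)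
    (h2 : ∀ b x, step b x = b ∨ R x (step b x))
    (h3 : ∀ b x n, R x n → step b x ≤ n)
    (l : List α) (b : Nat) :
    l.foldl step b ≤ b ∧ (l.foldl step b = b ∨ ∃ x ∈ l, R x (l.foldl step b)) ∧
      (∀ x ∈ l, ∀ n, R x n → l.foldl step b ≤ n) := by
  induction l generalizing b with
  | nil => exact ⟨le_rfl, Or.inl rfl, by simp⟩
  | cons x l ih =>
    obtain ⟨ihle, ihval, ihmin⟩ := ih (step b x)
    refine ⟨ihle.trans (h1 b x), ?_, ?_⟩
    · rcases ihval with h | ⟨y, hy, hR⟩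
      · rcases h2 b x with h' | h'
        · exact Or.inl (h.trans h')
        · exact Or.inr ⟨x, List.mem_cons_self .., h ▸ h'⟩
      · exact Or.inr ⟨y, List.mem_cons_of_mem _ hy, hR⟩
    · intro y hy n hR
      rcases List.mem_cons.mp hy with rfl | hy
      · exact ihle.trans (h3 b y n hR)
      · exact ihmin y hy n hR

-- membership in cdPriority determines A's corresponding branch flag
theorem flag_of_mem (p : String × Nat) (hp : p ∈ cdPriority) (s : String)
    (h : PySem.Str.isIn p.1 s = true) : cdFlag p.2 s = true := by
  simp only [cdPriority, List.mem_cons, List.not_mem_nil, or_false] at hp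
  rcases hp with rfl|rfl|rfl|rfl|rfl|rfl|rfl|rfl|rfl|rfl|rfl|rfl|rfl|rfl|rfl|rfl|rfl|rfl|rfl|rfl|rfl|rfl|rfl <;>
    (simp [PySem.Str.isIn_eq] at h; simp [cdFlag, PySem.Str.isIn_eq]; tauto)

-- A's flag j yields a keyword of priority j in cdPriority that occurs in s
theorem mem_of_flag (j : Nat) (s : String) (h : cdFlag j s = true) :
    ∃ p ∈ cdPriority, p.2 = j ∧ PySem.Str.isIn p.1 s = true := by
  match j with
  | 0 =>
    simp only [cdFlag, List.any_eq_true, List.mem_cons, List.not_mem_nil, or_false] at h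
    obtain ⟨w, hw, hin⟩ := h
    rcases hw with rfl|rfl|rfl|rfl|rfl
    · exact ⟨("increase", 0), by simp [cdPriority], rfl, hin⟩
    · exact ⟨("grow", 0), by simp [cdPriority], rfl, hin⟩
    · exact ⟨("rise", 0), by simp [cdPriority], rfl, hin⟩
    · exact ⟨("expand", 0), by simp [cdPriority], rfl, hin⟩
    · exact ⟨("gain", 0), by simp [cdPriority], rfl, hin⟩
  | 1 =>
    simp only [cdFlag, List.any_eq_true, List.mem_cons, List.not_mem_nil, or_false] at h
    obtain ⟨w, hw, hin⟩ := h
    rcases hw with rfl|rfl|rfl|rfl|rfl|rfl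
    · exact ⟨("decrease", 1), by simp [cdPriority], rfl, hin⟩
    · exact ⟨("fall", 1), by simp [cdPriority], rfl, hin⟩
    · exact ⟨("decline", 1), by simp [cdPriority], rfl, hin⟩
    · exact ⟨("drop", 1), by simp [cdPriority], rfl, hin⟩
    · exact ⟨("reduce", 1), by simp [cdPriority], rfl, hin⟩
    · exact ⟨("contract", 1), by simp [cdPriority], rfl, hin⟩
  | 2 =>
    simp only [cdFlag, List.any_eq_true, List.mem_cons, List.not_mem_nil, or_false] at h
    obtain ⟨w, hw, hin⟩ := h
    rcases hw with rfl|rfl|rfl|rfl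
    · exact ⟨("reach", 2), by simp [cdPriority], rfl, hin⟩
    · exact ⟨("hit", 2), by simp [cdPriority], rfl, hin⟩
    · exact ⟨("attain", 2), by simp [cdPriority], rfl, hin⟩
    · exact ⟨("achieve", 2), by simp [cdPriority], rfl, hin⟩
  | 3 =>
    simp only [cdFlag, List.any_eq_true, List.mem_cons, List.not_mem_nil, or_false] at h
    obtain ⟨w, hw, hin⟩ := h
    rcases hw with rfl|rfl|rfl|rfl
    · exact ⟨("remain", 3), by simp [cdPriority], rfl, hin⟩
    · exact ⟨("stable", 3), by simp [cdPriority], rfl, hin⟩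
    · exact ⟨("constant", 3), by simp [cdPriority], rfl, hin⟩
    · exact ⟨("unchanged", 3), by simp [cdPriority], rfl, hin⟩
  | 4 => exact ⟨("double", 4), by simp [cdPriority], rfl, h⟩
  | 5 =>
    simp only [cdFlag, Bool.or_eq_true] at h
    rcases h with h | h
    · exact ⟨("halve", 5), by simp [cdPriority], rfl, h⟩
    · exact ⟨("half", 5), by simp [cdPriority], rfl, h⟩
  | 6 => exact ⟨("triple", 6), by simp [cdPriority], rfl, h⟩
  | n+7 => simp [cdFlag] at h


-- 'kw in s' equals 'kw starts at some scanned position of s' (keywords are nonempty)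
theorem isIn_iff_exists_pos (p : String × Nat) (hp : p ∈ cdPriority) (s : String) :
    PySem.Str.isIn p.1 s = true ↔
      ∃ i ∈ List.range s.toList.length, p.1.toList.isPrefixOf (s.toList.drop i) = true := by
  have hne : p.1.toList ≠ [] := by
    simp only [cdPriority, List.mem_cons, List.not_mem_nil, or_false] at hp
    rcases hp with rfl|rfl|rfl|rfl|rfl|rfl|rfl|rfl|rfl|rfl|rfl|rfl|rfl|rfl|rfl|rfl|rfl|rfl|rfl|rfl|rfl|rfl|rfl <;> simp
  rw [PySem.Str.isIn_eq]
  constructor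
  · intro h
    obtain ⟨j, hj⟩ := (PySem.Chars.exists_prefix_drop_iff_isIn p.1.toList s.toList).mpr h
    by_cases hlt : j < s.toList.length
    · exact ⟨j, List.mem_range.mpr hlt, List.isPrefixOf_iff_prefix.mpr hj⟩
    · exfalso
      rw [List.drop_eq_nil_of_le (Nat.le_of_not_lt hlt)] at hj
      exact hne (List.prefix_nil.mp hj)
  · rintro ⟨i, _, hpre⟩
    exact (PySem.Chars.exists_prefix_drop_iff_isIn p.1.toList s.toList).mp
      ⟨i, List.isPrefixOf_iff_prefix.mp hpre⟩

-- characterization of B's nested fold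
theorem best_char (ps : List (String × Nat)) (v : List Char) :
    letI best := (List.range v.length).foldl
      (fun b i => ps.foldl
        (fun b p => if p.2 < b ∧ p.1.toList.isPrefixOf (v.drop i) then p.2 else b) b) 7
    best ≤ 7 ∧
      (best = 7 ∨ ∃ i ∈ List.range v.length, ∃ p ∈ ps,
          p.1.toList.isPrefixOf (v.drop i) = true ∧ p.2 = best) ∧
      (∀ i ∈ List.range v.length, ∀ p ∈ ps,
          p.1.toList.isPrefixOf (v.drop i) = true → best ≤ p.2) := by
  have inner : ∀ i b,
      ps.foldl (fun b p => if p.2 < b ∧ p.1.toList.isPrefixOf (v.drop i) then p.2 else b) b ≤ b ∧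
      (ps.foldl (fun b p => if p.2 < b ∧ p.1.toList.isPrefixOf (v.drop i) then p.2 else b) b = b ∨
        ∃ p ∈ ps, p.1.toList.isPrefixOf (v.drop i) = true ∧
          p.2 = ps.foldl (fun b p => if p.2 < b ∧ p.1.toList.isPrefixOf (v.drop i) then p.2 else b) b) ∧
      (∀ p ∈ ps, ∀ n, (p.1.toList.isPrefixOf (v.drop i) = true ∧ p.2 = n) →
        ps.foldl (fun b p => if p.2 < b ∧ p.1.toList.isPrefixOf (v.drop i) then p.2 else b) b ≤ n) := by
    intro i b
    have := minfold_char
      (fun b p => if p.2 < b ∧ p.1.toList.isPrefixOf (v.drop i) then p.2 else b)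
      (fun (p : String × Nat) n => p.1.toList.isPrefixOf (v.drop i) = true ∧ p.2 = n)
      (by intro b p
          dsimp only
          split
          · next h => exact Nat.le_of_lt h.1
          · exact Nat.le_refl b)
      (by intro b p
          dsimp only
          split
          · next h => exact Or.inr ⟨h.2, rfl⟩
          · exact Or.inl rfl)
      (by rintro b p n ⟨hpre, hn⟩
          dsimp only
          split
          · next h => omega
          · next h =>
              rw [not_and_or] at h
              rcases h with h | h
              · omega
              · exact absurd hpre h)
      ps b
    refine ⟨this.1, ?_, ?_⟩
    · rcases this.2.1 with h | ⟨p, hp, hR⟩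
      · exact Or.inl h
      · exact Or.inr ⟨p, hp, hR.1, hR.2⟩
    · intro p hp n hR
      exact this.2.2 p hp n hR
  have outer := minfold_char
    (fun b i => ps.foldl (fun b p => if p.2 < b ∧ p.1.toList.isPrefixOf (v.drop i) then p.2 else b) b)
    (fun i n => ∃ p ∈ ps, p.1.toList.isPrefixOf (v.drop i) = true ∧ p.2 = n)
    (fun b i => (inner i b).1)
    (by intro b i
        rcases (inner i b).2.1 with h | ⟨p, hp, hpre, hval⟩
        · exact Or.inl h
        · exact Or.inr ⟨p, hp, hpre, hval⟩)
    (by rintro b i n ⟨p, hp, hpre, hval⟩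
        exact (inner i b).2.2 p hp n ⟨hpre, hval⟩)
    (List.range v.length) 7
  refine ⟨outer.1, outer.2.1, ?_⟩
  intro i hi p hp hpre
  exact outer.2.2 i hi p.2 ⟨p, hp, hpre, rfl⟩

-- if flag j holds, B's best priority is ≤ j; if best < 7 then flag best holds
theorem best_le_of_flag (verb : String) (j : Nat)
    (h : cdFlag j (PySem.Str.lower verb) = true) :
    (List.range (PySem.Str.lower verb).toList.length).foldl
      (fun b i => cdPriority.foldl
        (fun b p => if p.2 < b ∧ p.1.toList.isPrefixOf ((PySem.Str.lower verb).toList.drop i) then p.2 else b) b) 7 ≤ j := by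
  obtain ⟨p, hp, hpj, hin⟩ := mem_of_flag j _ h
  obtain ⟨i, hi, hpre⟩ := (isIn_iff_exists_pos p hp _).mp hin
  exact hpj ▸ (best_char cdPriority (PySem.Str.lower verb).toList).2.2 i hi p hp hpre

theorem flag_of_best (verb : String)
    (h : (List.range (PySem.Str.lower verb).toList.length).foldl
      (fun b i => cdPriority.foldl
        (fun b p => if p.2 < b ∧ p.1.toList.isPrefixOf ((PySem.Str.lower verb).toList.drop i) then p.2 else b) b) 7 < 7) :
    cdFlag ((List.range (PySem.Str.lower verb).toList.length).foldl
      (fun b i => cdPriority.foldl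
        (fun b p => if p.2 < b ∧ p.1.toList.isPrefixOf ((PySem.Str.lower verb).toList.drop i) then p.2 else b) b) 7)
      (PySem.Str.lower verb) = true := by
  rcases (best_char cdPriority (PySem.Str.lower verb).toList).2.1 with heq | ⟨i, hi, p, hp, hpre, hval⟩
  · omega
  · exact hval ▸ flag_of_mem p hp _ ((isIn_iff_exists_pos p hp _).mpr ⟨i, hi, hpre⟩)

-- A's if/elif chain equals the label of the minimum satisfied priority
theorem chain_eq (s : String) (best : Nat) (hle : best ≤ 7)
    (hflag : best < 7 → cdFlag best s = true)
    (hbestle : ∀ j, cdFlag j s = true → best ≤ j) :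
    (if cdFlag 0 s then "increase"
     else if cdFlag 1 s then "decrease"
     else if cdFlag 2 s then "target"
     else if cdFlag 3 s then "stable"
     else if cdFlag 4 s then "double"
     else if cdFlag 5 s then "halve"
     else if cdFlag 6 s then "triple"
     else "increase")
    = (if best < 7 then cdLabels.getD best "increase" else "increase") := by
  by_cases h0 : cdFlag 0 s = true
  · have hb : best = 0 := Nat.le_zero.mp (hbestle 0 h0)
    simp [h0, hb, cdLabels]
  by_cases h1 : cdFlag 1 s = true
  · have hb : best = 1 := by
      have hB1 := hbestle 1 h1
      interval_cases best
      · exact absurd (hflag (by omega)) h0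
      · rfl
    simp [h0, h1, hb, cdLabels]
  by_cases h2 : cdFlag 2 s = true
  · have hb : best = 2 := by
      have hB2 := hbestle 2 h2
      interval_cases best
      · exact absurd (hflag (by omega)) h0
      · exact absurd (hflag (by omega)) h1
      · rfl
    simp [h0, h1, h2, hb, cdLabels]
  by_cases h3 : cdFlag 3 s = true
  · have hb : best = 3 := by
      have hB3 := hbestle 3 h3
      interval_cases best
      · exact absurd (hflag (by omega)) h0
      · exact absurd (hflag (by omega)) h1
      · exact absurd (hflag (by omega)) h2
      · rfl
    simp [h0, h1, h2, h3, hb, cdLabels]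
  by_cases h4 : cdFlag 4 s = true
  · have hb : best = 4 := by
      have hB4 := hbestle 4 h4
      interval_cases best
      · exact absurd (hflag (by omega)) h0
      · exact absurd (hflag (by omega)) h1
      · exact absurd (hflag (by omega)) h2
      · exact absurd (hflag (by omega)) h3
      · rfl
    simp [h0, h1, h2, h3, h4, hb, cdLabels]
  by_cases h5 : cdFlag 5 s = true
  · have hb : best = 5 := by
      have hB5 := hbestle 5 h5
      interval_cases best
      · exact absurd (hflag (by omega)) h0
      · exact absurd (hflag (by omega)) h1
      · exact absurd (hflag (by omega)) h2
      · exact absurd (hflag (by omega)) h3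
      · exact absurd (hflag (by omega)) h4
      · rfl
    simp [h0, h1, h2, h3, h4, h5, hb, cdLabels]
  by_cases h6 : cdFlag 6 s = true
  · have hb : best = 6 := by
      have hB6 := hbestle 6 h6
      interval_cases best
      · exact absurd (hflag (by omega)) h0
      · exact absurd (hflag (by omega)) h1
      · exact absurd (hflag (by omega)) h2
      · exact absurd (hflag (by omega)) h3
      · exact absurd (hflag (by omega)) h4
      · exact absurd (hflag (by omega)) h5
      · rfl
    simp [h0, h1, h2, h3, h4, h5, h6, hb, cdLabels]
  · have hb : best = 7 := by
      interval_cases best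
      · exact absurd (hflag (by omega)) h0
      · exact absurd (hflag (by omega)) h1
      · exact absurd (hflag (by omega)) h2
      · exact absurd (hflag (by omega)) h3
      · exact absurd (hflag (by omega)) h4
      · exact absurd (hflag (by omega)) h5
      · exact absurd (hflag (by omega)) h6
      · rfl
    simp [h0, h1, h2, h3, h4, h5, h6, hb]

-- ===== VERDICT (by name: the statement is the Claim_ definition above) =====
theorem classify_direction_spec : Claim_equal_classify_direction := by
  intro verb _
  unfold Spec_classify_direction
  show classify_direction verb = classify_direction_alt verb
  have hA : classify_direction verb =
      (if cdFlag 0 (PySem.Str.lower verb) then "increase"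
       else if cdFlag 1 (PySem.Str.lower verb) then "decrease"
       else if cdFlag 2 (PySem.Str.lower verb) then "target"
       else if cdFlag 3 (PySem.Str.lower verb) then "stable"
       else if cdFlag 4 (PySem.Str.lower verb) then "double"
       else if cdFlag 5 (PySem.Str.lower verb) then "halve"
       else if cdFlag 6 (PySem.Str.lower verb) then "triple"
       else "increase") := rfl
  have hB : classify_direction_alt verb =
      (if ((List.range (PySem.Str.lower verb).toList.length).foldl
            (fun b i => cdPriority.foldl
              (fun b p => if p.2 < b ∧ p.1.toList.isPrefixOf ((PySem.Str.lower verb).toList.drop i) then p.2 else b) b) 7) < 7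
       then cdLabels.getD ((List.range (PySem.Str.lower verb).toList.length).foldl
            (fun b i => cdPriority.foldl
              (fun b p => if p.2 < b ∧ p.1.toList.isPrefixOf ((PySem.Str.lower verb).toList.drop i) then p.2 else b) b) 7) "increase"
       else "increase") := rfl
  rw [hA, hB]
  exact chain_eq (PySem.Str.lower verb) _
    (best_char cdPriority (PySem.Str.lower verb).toList).1
    (fun h => flag_of_best verb h)
    (fun j hj => best_le_of_flag verb j hj)
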